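-- pv_equiv track=rewrite | github.com/Datlightning/AdventOfCode2025 | day10/day10.py | is_int_ascii
-- ===== SOURCE A (Python) =====
-- def is_int_ascii(s):
--     if not s:
--         return False
--     for c in s:
--         code = ord(c)
--         if code < 48 or code > 57:
--             return False
--     return True
-- ===== SOURCE B (Python) =====
-- def is_int_ascii(s):
--     return bool(s) and '0' <= min(s) and max(s) <= '9'
-- ===== Notes on version B (the rewrite author's own statement) =====
-- stated objective: alternative
-- what changed: Replaces the per-character branching scan with two aggregate reductions: it computes the minimum and maximum character of the string and compares them against the digit-range bounds, which works because the ASCII digits form a contiguous range.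
import Mathlib
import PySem

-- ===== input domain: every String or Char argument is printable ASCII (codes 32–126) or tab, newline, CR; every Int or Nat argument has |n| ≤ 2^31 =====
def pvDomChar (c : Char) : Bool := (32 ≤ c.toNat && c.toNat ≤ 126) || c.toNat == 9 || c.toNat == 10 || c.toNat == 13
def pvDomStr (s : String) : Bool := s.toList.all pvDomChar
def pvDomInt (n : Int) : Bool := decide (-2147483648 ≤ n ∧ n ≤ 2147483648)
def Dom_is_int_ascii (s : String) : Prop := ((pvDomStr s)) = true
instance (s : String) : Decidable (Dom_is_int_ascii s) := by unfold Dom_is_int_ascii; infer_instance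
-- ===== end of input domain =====

-- B replaces A's per-character branching scan by two aggregate reductions: min(s) and max(s)
-- compared against '0' and '9' (correct because the ASCII digits are a contiguous range).

-- ===== PORT A =====
-- the 'for c in s' loop: first out-of-range character returns False
def isIntAsciiLoop : List Char → Bool
  | [] => true
  | c :: rest =>
      let code := c.toNat
      if code < 48 ∨ code > 57 then false else isIntAsciiLoop rest

def is_int_ascii (s : String) : Bool :=
  if s.toList = [] then false else isIntAsciiLoop s.toList

-- ===== PORT B =====
-- bool(s) and '0' <= min(s) and max(s) <= '9'
def is_int_ascii_alt (s : String) : Bool :=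
  !s.toList.isEmpty &&
    (match PySem.List.min? s.toList (fun c => c) with
     | some m => decide ('0' ≤ m)
     | none => false) &&
    (match PySem.List.max? s.toList (fun c => c) with
     | some m => decide (m ≤ '9')
     | none => false)

-- ===== PRECONDITION & SPEC =====
def Spec_is_int_ascii (s : String) (out : Bool) : Prop := out = is_int_ascii_alt s
instance (s : String) (out : Bool) : Decidable (Spec_is_int_ascii s out) := by unfold Spec_is_int_ascii; infer_instance

-- ===== CLAIM (what is proved, stated in full; the proofs are below) =====
def Claim_equal_is_int_ascii : Prop := ∀ (s : String), Dom_is_int_ascii s → Spec_is_int_ascii s (is_int_ascii s)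

-- ===== LEMMAS AND PROOFS =====
theorem char_range_iff (c : Char) :
    (¬ (c.toNat < 48 ∨ c.toNat > 57)) ↔ ('0' ≤ c ∧ c ≤ '9') := by
  rw [Char.le_def, Char.le_def, UInt32.le_iff_toNat_le, UInt32.le_iff_toNat_le]
  show _ ↔ (48 ≤ c.toNat ∧ c.toNat ≤ 57)
  omega

theorem loop_iff (l : List Char) :
    isIntAsciiLoop l = true ↔ ∀ c ∈ l, '0' ≤ c ∧ c ≤ '9' := by
  induction l with
  | nil => simp [isIntAsciiLoop]
  | cons c rest ih =>
      simp only [isIntAsciiLoop, List.mem_cons]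
      by_cases h : c.toNat < 48 ∨ c.toNat > 57
      · simp only [if_pos h]
        constructor
        · intro hf; cases hf
        · intro hall
          exact absurd h (not_or.mpr (by simpa using not_or.mp ((char_range_iff c).mpr (hall c (Or.inl rfl)))))
      · simp only [if_neg h, ih]
        constructor
        · intro hall x hx
          rcases hx with rfl | hx
          · exact (char_range_iff x).mp h
          · exact hall x hx
        · intro hall x hx; exact hall x (Or.inr hx)

-- ===== VERDICT (by name: the statement is the Claim_ definition above) =====
theorem is_int_ascii_spec : Claim_equal_is_int_ascii := by
  intro s _
  unfold Spec_is_int_ascii is_int_ascii is_int_ascii_alt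
  by_cases hnil : s.toList = []
  · simp [hnil, PySem.List.min?, PySem.List.max?]
  · rcases hm : PySem.List.min? s.toList (fun c : Char => c) with _ | m
    · exact absurd ((PySem.List.min?_eq_none_iff s.toList (fun c : Char => c)).mp hm) hnil
    rcases hM : PySem.List.max? s.toList (fun c : Char => c) with _ | M
    · exact absurd ((PySem.List.max?_eq_none_iff s.toList (fun c : Char => c)).mp hM) hnil
    rw [if_neg hnil, Bool.eq_iff_iff, loop_iff]
    simp only [Bool.and_eq_true, Bool.not_eq_eq_eq_not, Bool.not_true,
      List.isEmpty_eq_false_iff, decide_eq_true_eq]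
    constructor
    · intro hall
      exact ⟨⟨hnil, (hall m (PySem.List.min?_mem hm)).1⟩,
        (hall M (PySem.List.max?_mem hM)).2⟩
    · rintro ⟨⟨-, h0⟩, h9⟩ c hc
      exact ⟨le_trans h0 (PySem.List.min?_isMin hm c hc),
        le_trans (PySem.List.max?_isMax hM c hc) h9⟩
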